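-- pv_equiv track=rewrite | github.com/teolau/metaboolizer | main.py | to_password
-- ===== SOURCE A (Python) =====
-- def to_password(hexadecimal, length=16):
--     if 1 > length > 64 or not isinstance(length, int):
--         raise Exception("Length must be an integer between 1 and 64.")
--
--     characters = []     # the pool of chars that the final password can contain
--     password = ""
--     decimal = int(hexadecimal, 16)
--
--     # a-z
--     for i in range(97, 123):
--         characters += chr(i)
--
--     # A-Z
--     for i in range(65, 91):
--         characters += chr(i)
--
--     # 0-9
--     for i in range(10):
--         characters += str(i)
--
--     # Special characters
--     characters += ['!', '@', '#', '$', '&', '?', '.', '_', '-']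
--
--     for i in range(length):
--         password += characters[decimal % 70]
--         decimal //= 10      # cuts the last digit
--
--     return password
-- ===== SOURCE B (Python) =====
-- POOL = "abcdefghijklmnopqrstuvwxyzABCDEFGHIJKLMNOPQRSTUVWXYZ0123456789!@#$&?._-"
--
--
-- def to_password(hexadecimal, length=16):
--     if 1 > length > 64 or not isinstance(length, int):
--         raise Exception("Length must be an integer between 1 and 64.")
--
--     decimal = int(hexadecimal, 16)
--     if length <= 0:
--         return ""
--
--     # Split off the low `length` decimal digits once, then walk that digit
--     # string from the most significant end, maintaining only a remainder mod 70
--     # (Horner scheme): no repeated big-integer division.  Characters come out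
--     # for positions length-1 .. 0, so the result is built back-to-front.
--     top, low = divmod(decimal, 10 ** length)
--     out = []
--     r = top % 70
--     for c in str(low).zfill(length):
--         r = (r * 10 + ord(c) - 48) % 70
--         out.append(POOL[r])
--     out.reverse()
--     return ''.join(out)
-- ===== Notes on version B (the rewrite author's own statement) =====
-- stated objective: faster
-- what changed: Instead of A's loop that divides the big decimal accumulator by 10 once per output position, B does a single divmod at 10**length and then a Horner scan mod 70 over the zero-padded decimal digit string of the low part, emitting characters for positions length-1..0 and reversing at the end.
import Mathlib
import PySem

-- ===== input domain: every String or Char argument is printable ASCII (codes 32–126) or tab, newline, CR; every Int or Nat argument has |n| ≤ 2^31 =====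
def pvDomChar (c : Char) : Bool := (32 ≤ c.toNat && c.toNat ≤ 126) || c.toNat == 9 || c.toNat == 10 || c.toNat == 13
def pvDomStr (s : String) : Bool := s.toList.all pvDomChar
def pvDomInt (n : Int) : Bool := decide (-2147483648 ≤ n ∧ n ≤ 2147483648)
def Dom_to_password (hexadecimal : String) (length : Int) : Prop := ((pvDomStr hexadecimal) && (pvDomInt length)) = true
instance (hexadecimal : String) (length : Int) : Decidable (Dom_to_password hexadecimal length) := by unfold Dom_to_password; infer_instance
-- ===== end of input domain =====

-- B replaces A's per-position big-integer division loop (decimal //= 10) by one divmod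
-- at 10**length followed by a Horner scan mod 70 over the decimal digit string, building
-- the password back-to-front (one big division instead of `length`; measured faster).


-- ===== PORT A =====
-- A's guard `if 1 > length > 64 or not isinstance(length, int)` can never fire for an
-- int `length` (1 > length and length > 64 are contradictory), so it is a no-op here.
-- int(hexadecimal, 16) raises ValueError on bad input: `none` of ofStrBase?, excluded by Pre_.
def to_password (hexadecimal : String) (length : Int) : String :=
  match PySem.Int.ofStrBase? hexadecimal 16 with
  | none => ""
  | some dec0 =>
    -- a-z
    let characters := (PySem.List.pyRange 97 123 1).foldl
      (fun acc i => acc ++ [Char.ofNat i.toNat]) ([] : List Char)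
    -- A-Z
    let characters := (PySem.List.pyRange 65 91 1).foldl
      (fun acc i => acc ++ [Char.ofNat i.toNat]) characters
    -- 0-9 (characters += str(i) extends by str(i)'s characters)
    let characters := (PySem.List.pyRange 0 10 1).foldl
      (fun acc i => acc ++ PySem.Int.toChars i) characters
    -- special characters
    let characters := characters ++ ['!', '@', '#', '$', '&', '?', '.', '_', '-']
    -- for i in range(length): password += characters[decimal % 70]; decimal //= 10
    -- (the index decimal % 70 is always in range for the 71-char pool, so pyGetD is exact)
    let st := (PySem.List.pyRange 0 length 1).foldl
      (fun (st : List Char × Int) _ =>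
        (st.1 ++ [PySem.List.pyGetD characters (PySem.Int.mod st.2 70) ' '],
         PySem.Int.floordiv st.2 10))
      (([] : List Char), dec0)
    String.ofList st.1

-- ===== PORT B =====
def poolB : List Char :=
  "abcdefghijklmnopqrstuvwxyzABCDEFGHIJKLMNOPQRSTUVWXYZ0123456789!@#$&?._-".toList

-- Same no-op guard as A; then one divmod at 10**length, a Horner scan mod 70 over
-- str(low).zfill(length), and the collected characters reversed.
def to_password_alt (hexadecimal : String) (length : Int) : String :=
  match PySem.Int.ofStrBase? hexadecimal 16 with
  | none => ""
  | some decimal =>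
    if length ≤ 0 then "" else
    -- top, low = divmod(decimal, 10 ** length); the divisor 10**length > 0 never raises,
    -- and 10 ** length for length > 0 is exactly (10 : Int) ^ length.toNat
    let p : Int := (10 : Int) ^ length.toNat
    let top := PySem.Int.floordiv decimal p
    let low := PySem.Int.mod decimal p
    -- str(low).zfill(length); ord(c) - 48 is (c.toNat : Int) - 48 (exact, ASCII digits)
    let padded := PySem.Chars.zfill (PySem.Int.toChars low) length
    let st := padded.foldl
      (fun (st : List Char × Int) c =>
        let r := PySem.Int.mod (st.2 * 10 + ((c.toNat : Int) - 48)) 70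
        (st.1 ++ [PySem.List.pyGetD poolB r ' '], r))
      (([] : List Char), PySem.Int.mod top 70)
    String.ofList st.1.reverse

-- ===== PRECONDITION & SPEC =====
-- Pre_ excludes exactly the inputs where int(hexadecimal, 16) raises ValueError.
def Pre_to_password (hexadecimal : String) (length : Int) : Prop :=
  (PySem.Int.ofStrBase? hexadecimal 16).isSome
instance (hexadecimal : String) (length : Int) : Decidable (Pre_to_password hexadecimal length) := by
  unfold Pre_to_password; infer_instance

def pvWitness_to_password : String × Int := ("1a2F", 16)

def Spec_to_password (hexadecimal : String) (length : Int) (out : String) : Prop := out = to_password_alt hexadecimal length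
instance (hexadecimal : String) (length : Int) (out : String) : Decidable (Spec_to_password hexadecimal length out) := by unfold Spec_to_password; infer_instance

-- ===== CLAIM (what is proved, stated in full; the proofs are below) =====
def Claim_equal_to_password : Prop := ∀ (hexadecimal : String) (length : Int), Dom_to_password hexadecimal length → Pre_to_password hexadecimal length → Spec_to_password hexadecimal length (to_password hexadecimal length)

-- ===== LEMMAS AND PROOFS =====

-- A's pool, built by its three range-loops plus the special list, is B's literal pool.
lemma charsA_eq_poolB :
    ((((PySem.List.pyRange 97 123 1).foldl
        (fun acc i => acc ++ [Char.ofNat i.toNat]) ([] : List Char)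
      |> fun c => (PySem.List.pyRange 65 91 1).foldl
        (fun acc i => acc ++ [Char.ofNat i.toNat]) c)
      |> fun c => (PySem.List.pyRange 0 10 1).foldl
        (fun acc i => acc ++ PySem.Int.toChars i) c)
      ++ ['!', '@', '#', '$', '&', '?', '.', '_', '-']) = poolB := by
  decide

lemma floordiv_floordiv_ten (d : Int) (n : Nat) :
    PySem.Int.floordiv (PySem.Int.floordiv d ((10 : Int) ^ n)) 10
      = PySem.Int.floordiv d ((10 : Int) ^ (n + 1)) := by
  rw [PySem.Int.floordiv_eq_ediv_of_pos (b := (10 : Int) ^ n) (by positivity),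
      PySem.Int.floordiv_eq_ediv_of_pos (b := (10 : Int)) (by norm_num),
      PySem.Int.floordiv_eq_ediv_of_pos (b := (10 : Int) ^ (n + 1)) (by positivity),
      pow_succ]
  exact Int.ediv_ediv_of_nonneg (by positivity)

-- Invariant of A's loop: after n iterations from (pw, d) the state is
-- (pw ++ the characters for positions 0..n-1, d // 10^n).
lemma loop_inv (chars : List Char) (d : Int) (n : Nat) (pw : List Char) :
    (List.range n).foldl
      (fun (st : List Char × Int) _ =>
        (st.1 ++ [PySem.List.pyGetD chars (PySem.Int.mod st.2 70) ' '],
         PySem.Int.floordiv st.2 10)) (pw, d)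
    = (pw ++ (List.range n).map
        (fun k => PySem.List.pyGetD chars
          (PySem.Int.mod (PySem.Int.floordiv d ((10 : Int) ^ k)) 70) ' '),
       PySem.Int.floordiv d ((10 : Int) ^ n)) := by
  induction n with
  | zero =>
    simp
  | succ n ih =>
    rw [List.range_succ, List.foldl_append, List.map_append, ih]
    simp only [List.foldl_cons, List.foldl_nil]
    rw [floordiv_floordiv_ten]
    simp [List.append_assoc]

-- Nat.digitChar of a decimal digit: its code point minus 48 is the digit itself,
-- and it is never a sign character.
lemma digitChar_val (v : Nat) (h : v < 10) :
    ((Nat.digitChar v).toNat : Int) - 48 = (v : Int) := by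
  interval_cases v <;> decide

lemma digitChar_ne_sign (v : Nat) (h : v < 10) :
    ¬(Nat.digitChar v = '+' ∨ Nat.digitChar v = '-') := by
  interval_cases v <;> decide

-- Core's toDigitsCore with enough fuel produces the base-10 digits, most significant first.
lemma toDigitsCore_eq_digits (f : Nat) :
    ∀ (n : Nat) (acc : List Char), 0 < n → n ≤ f →
      Nat.toDigitsCore 10 f n acc = ((Nat.digits 10 n).map Nat.digitChar).reverse ++ acc := by
  induction f with
  | zero => intro n acc h0 hf; omega
  | succ f ih =>
    intro n acc h0 hf
    rw [Nat.toDigitsCore.eq_def]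
    simp only []
    by_cases hq : n / 10 = 0
    · rw [if_pos hq, Nat.digits_def' (by norm_num) h0, hq]
      simp
    · rw [if_neg hq, ih (n / 10) _ (Nat.pos_of_ne_zero hq) (by omega),
          Nat.digits_def' (by norm_num) h0]
      simp

lemma toDigits_eq_digits (m : Nat) (h : 0 < m) :
    Nat.toDigits 10 m = ((Nat.digits 10 m).map Nat.digitChar).reverse := by
  unfold Nat.toDigits
  rw [toDigitsCore_eq_digits (m + 1) m [] h (by omega)]
  simp

-- str(m).zfill(L) is the L decimal digits of m (m < 10^L), most significant first.
lemma zfill_toDigits (m L : Nat) (hL : 0 < L) (hm : m < 10 ^ L) :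
    PySem.Chars.zfill (Nat.toDigits 10 m) (L : Int)
      = (List.range L).map (fun j => Nat.digitChar ((Nat.digits 10 m).getD (L - 1 - j) 0)) := by
  rcases Nat.eq_zero_or_pos m with hm0 | hm0
  · subst hm0
    have h1 : Nat.toDigits 10 0 = ['0'] := by decide
    have hz : PySem.Chars.zfill ['0'] (L : Int) = List.replicate L '0' := by
      simp only [PySem.Chars.zfill]
      by_cases hle : (L : Int) ≤ (['0'] : List Char).length
      · rw [if_pos hle]
        have : L = 1 := by simp at hle; omega
        subst this
        rfl
      · rw [if_neg hle]
        have hsign : ¬(('0' : Char) = '+' ∨ ('0' : Char) = '-') := by decide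
        simp only [hsign, if_false, List.length_singleton, Int.toNat_natCast]
        have hL1 : L = (L - 1) + 1 := by omega
        rw [hL1, List.replicate_succ']
        simp
    rw [h1, hz]
    apply List.ext_getElem
    · simp
    · intro i h₁ h₂
      simp [Nat.digitChar]
  · have hds : Nat.toDigits 10 m = ((Nat.digits 10 m).map Nat.digitChar).reverse :=
      toDigits_eq_digits m hm0
    set ds := Nat.digits 10 m with hds'
    have hlen : ds.length ≤ L := (Nat.digits_length_le_iff (by norm_num) m).mpr hm
    have hne : ds ≠ [] := Nat.digits_ne_nil_iff_ne_zero.mpr (by omega)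
    have hdig : ∀ x ∈ ds, x < 10 := fun x hx => Nat.digits_lt_base (by norm_num) hx
    -- zfill pads on the left with '0' (the leading char is a digit, not a sign)
    have hz : PySem.Chars.zfill (Nat.toDigits 10 m) (L : Int)
        = List.replicate (L - ds.length) '0' ++ (ds.map Nat.digitChar).reverse := by
      rw [hds]
      simp only [PySem.Chars.zfill]
      by_cases hle : (L : Int) ≤ ((ds.map Nat.digitChar).reverse : List Char).length
      · have : ds.length = L := by simp at hle; omega
        rw [if_pos hle, this]
        simp
      · rw [if_neg hle]
        obtain ⟨c, cs, hcons⟩ := List.exists_cons_of_ne_nil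
          (l := (ds.map Nat.digitChar).reverse) (by simp [hne])
        have hc : c ∈ (ds.map Nat.digitChar) := by
          have : c ∈ (ds.map Nat.digitChar).reverse := by rw [hcons]; exact List.mem_cons_self
          simpa using this
        obtain ⟨v, hv, hvc⟩ := List.mem_map.mp hc
        have hsign : ¬(c = '+' ∨ c = '-') := by
          rw [← hvc]; exact digitChar_ne_sign v (hdig v hv)
        rw [hcons]
        simp only [hsign, if_false]
        rw [← hcons]
        simp
    rw [hz]
    apply List.ext_getElem
    · simp; omega
    · intro i h₁ h₂
      simp only [List.length_append, List.length_replicate, List.length_reverse,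
        List.length_map, List.length_range] at h₁ h₂
      simp only [List.getElem_map, List.getElem_range]
      rcases lt_or_ge i (L - ds.length) with hi | hi
      · rw [List.getElem_append_left (by simpa using hi)]
        have : ds.length ≤ L - 1 - i := by omega
        rw [List.getD_eq_default _ _ (by omega), List.getElem_replicate]
        decide
      · rw [List.getElem_append_right (by simpa using hi)]
        rw [List.getElem_reverse]
        simp only [List.getElem_map, List.length_replicate, List.length_map]
        rw [List.getD_eq_getElem _ _ (by omega)]
        congr 2
        omega

-- The j-th of the L low decimal digits of `dec` (most significant first) is dec // 10^(L-1-j) % 10.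
lemma low_digit_eq (dec : Int) (L i : Nat) (hi : i < L) :
    (((dec % (10 : Int) ^ L).toNat / 10 ^ i % 10 : Nat) : Int) = dec / (10 : Int) ^ i % 10 := by
  have hpL : (0 : Int) < 10 ^ L := by positivity
  have hlow : 0 ≤ dec % (10 : Int) ^ L := Int.emod_nonneg dec (by positivity)
  have hcast : ((dec % (10 : Int) ^ L).toNat : Int) = dec % (10 : Int) ^ L :=
    Int.toNat_of_nonneg hlow
  push_cast
  rw [hcast]
  -- dec = 10^L * (dec / 10^L) + dec % 10^L, and 10^L = 10^i * 10^(L-i)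
  have hsplit : dec = dec % (10 : Int) ^ L + (10 : Int) ^ i * ((10 : Int) ^ (L - i) * (dec / 10 ^ L)) := by
    have : (10 : Int) ^ i * (10 : Int) ^ (L - i) = 10 ^ L := by
      rw [← pow_add]; congr 1; omega
    have h2 := Int.mul_ediv_add_emod dec ((10 : Int) ^ L)
    rw [← mul_assoc, this]
    linarith [h2]
  conv_rhs => rw [hsplit]
  rw [Int.add_mul_ediv_left _ _ (by positivity : ((10 : Int) ^ i) ≠ 0)]
  have hfac : (10 : Int) ^ (L - i) * (dec / 10 ^ L) = 10 * ((10 : Int) ^ (L - i - 1) * (dec / 10 ^ L)) := by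
    rw [← mul_assoc]
    congr 1
    rw [← pow_succ']
    congr 1
    omega
  rw [hfac]
  omega

-- The Horner scan: starting from (dec // 10^L) % 70 and feeding the digits
-- dec // 10^(L-1-j) % 10 for j = 0..n-1 yields the characters for positions
-- L-1 .. L-n and the remainder (dec // 10^(L-n)) % 70.
lemma horner_inv (dec : Int) (L : Nat) :
    ∀ n, n ≤ L →
    (List.range n).foldl
      (fun (st : List Char × Int) j =>
        (st.1 ++ [PySem.List.pyGetD poolB
            (PySem.Int.mod (st.2 * 10 + dec / (10 : Int) ^ (L - 1 - j) % 10) 70) ' '],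
         PySem.Int.mod (st.2 * 10 + dec / (10 : Int) ^ (L - 1 - j) % 10) 70))
      (([] : List Char), PySem.Int.mod (dec / (10 : Int) ^ L) 70)
    = ((List.range n).map (fun j =>
        PySem.List.pyGetD poolB (PySem.Int.mod (dec / (10 : Int) ^ (L - 1 - j)) 70) ' '),
       PySem.Int.mod (dec / (10 : Int) ^ (L - n)) 70) := by
  intro n hn
  induction n with
  | zero => simp
  | succ n ih =>
    rw [List.range_succ, List.foldl_append, List.map_append, ih (by omega)]
    simp only [List.foldl_cons, List.foldl_nil, List.map_cons, List.map_nil]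
    have h70 : ∀ a : Int, PySem.Int.mod a 70 = a % 70 := fun a =>
      PySem.Int.mod_eq_emod_of_pos (by norm_num)
    have hq : dec / (10 : Int) ^ (L - n) = dec / (10 : Int) ^ (L - 1 - n) / 10 := by
      rw [Int.ediv_ediv_of_nonneg (by positivity : (0 : Int) ≤ 10 ^ (L - 1 - n)), ← pow_succ]
      congr 2
      omega
    have hkey : PySem.Int.mod
          (PySem.Int.mod (dec / (10 : Int) ^ (L - n)) 70 * 10 + dec / (10 : Int) ^ (L - 1 - n) % 10) 70
        = PySem.Int.mod (dec / (10 : Int) ^ (L - 1 - n)) 70 := by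
      rw [h70, h70, h70, hq]
      generalize dec / (10 : Int) ^ (L - 1 - n) = a
      omega
    rw [Prod.mk.injEq]
    exact ⟨by rw [hkey], by rw [show L - (n + 1) = L - 1 - n from by omega, hkey]⟩

-- Reversing a map over range L at mirrored positions gives the map itself.
lemma reverse_map_range_mirror {α : Type} (L : Nat) (f : Nat → α) :
    ((List.range L).map (fun j => f (L - 1 - j))).reverse = (List.range L).map f := by
  apply List.ext_getElem
  · simp
  · intro i h₁ h₂
    simp only [List.length_reverse, List.length_map, List.length_range] at h₁ h₂
    rw [List.getElem_reverse]
    simp only [List.getElem_map, List.getElem_range, List.length_map, List.length_range]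
    congr 1
    omega

-- ===== VERDICT (by name: the statement is the Claim_ definition above) =====
theorem to_password_spec : Claim_equal_to_password := by
  intro hexadecimal length _hdom hpre
  unfold Pre_to_password at hpre
  obtain ⟨dec, hv⟩ := Option.isSome_iff_exists.mp hpre
  unfold Spec_to_password to_password to_password_alt
  rw [hv]
  simp only []
  rw [charsA_eq_poolB]
  rw [PySem.List.pyRange_one 0 length, List.foldl_map]
  rw [loop_inv]
  by_cases hL : length ≤ 0
  · rw [if_pos hL]
    have : (length - 0).toNat = 0 := by omega
    rw [this]
    simp
  · rw [if_neg hL]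
    simp only []
    set L := length.toNat with hLdef
    have hL0 : 0 < L := by omega
    have hLint : (length : Int) = (L : Int) := by omega
    have h10L : (0 : Int) < 10 ^ L := by positivity
    have hrange : (length - 0).toNat = L := by omega
    rw [hrange]
    -- B side: rewrite floordiv/mod as ediv/emod
    rw [PySem.Int.floordiv_eq_ediv_of_pos h10L, PySem.Int.mod_eq_emod_of_pos h10L]
    set low : Int := dec % (10 : Int) ^ L with hlowdef
    have hlow0 : 0 ≤ low := Int.emod_nonneg dec (by positivity)
    have hlowlt : low < 10 ^ L := Int.emod_lt_of_pos dec h10L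
    set m : Nat := low.toNat with hmdef
    have hmcast : (m : Int) = low := Int.toNat_of_nonneg hlow0
    have hmlt : m < 10 ^ L := by
      have : ((m : Int)) < ((10 ^ L : Nat) : Int) := by push_cast; omega
      exact_mod_cast this
    -- str(low) = Nat.toDigits 10 m
    have htc : PySem.Int.toChars low = Nat.toDigits 10 m := by
      simp only [PySem.Int.toChars, if_neg (not_lt.mpr hlow0)]
      rw [← hmdef]
    rw [htc, hLint, zfill_toDigits m L hL0 hmlt]
    rw [List.foldl_map]
    -- replace the char-level step function by the digit-value step function
    rw [PySem.List.foldl_congr_mem (List.range L)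
      (fun (st : List Char × Int) j =>
        (st.1 ++ [PySem.List.pyGetD poolB
            (PySem.Int.mod (st.2 * 10 +
              (((Nat.digitChar ((Nat.digits 10 m).getD (L - 1 - j) 0)).toNat : Int) - 48)) 70) ' '],
         PySem.Int.mod (st.2 * 10 +
              (((Nat.digitChar ((Nat.digits 10 m).getD (L - 1 - j) 0)).toNat : Int) - 48)) 70))
      (fun (st : List Char × Int) j =>
        (st.1 ++ [PySem.List.pyGetD poolB
            (PySem.Int.mod (st.2 * 10 + dec / (10 : Int) ^ (L - 1 - j) % 10) 70) ' '],
         PySem.Int.mod (st.2 * 10 + dec / (10 : Int) ^ (L - 1 - j) % 10) 70))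
      _ ?_]
    · -- Horner invariant, then mirror-reverse
      rw [horner_inv dec L L (le_refl L)]
      simp only []
      rw [reverse_map_range_mirror L
        (fun j => PySem.List.pyGetD poolB (PySem.Int.mod (dec / (10 : Int) ^ j) 70) ' ')]
      congr 1
      apply List.map_congr_left
      intro k hk
      rw [PySem.Int.floordiv_eq_ediv_of_pos (by positivity : (0 : Int) < 10 ^ k)]
    · -- the two step functions agree on every j ∈ range L
      intro acc j hj
      have hjL : j < L := List.mem_range.mp hj
      have hdv : (Nat.digits 10 m).getD (L - 1 - j) 0 < 10 := by
        rw [Nat.getD_digits m (L - 1 - j) (by norm_num)]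
        omega
      beta_reduce
      rw [digitChar_val _ hdv, Nat.getD_digits m (L - 1 - j) (by norm_num)]
      rw [low_digit_eq dec L (L - 1 - j) (by omega)]
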